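-- pv_equiv track=rewrite | github.com/Zih-Ming/LaneChangingCompatibleScheduling | sa.py | transformOrderView
-- ===== SOURCE A (Python) =====
-- def transformOrderView(order):
--     order_another_view, accu = [], 0
--     for i in range(len(order)):
--         for j in range(order[i]):
--             order_another_view.append(accu)
--             accu = 0
--         accu += 1
--     order_another_view.append(accu-1)
--     return order_another_view
-- ===== SOURCE B (Python) =====
-- def transformOrderView(order):
--     expanded = [i for i, c in enumerate(order) for _ in range(c)]
--     seq = [0] + expanded + [len(order) - 1]
--     return [b - a for a, b in zip(seq, seq[1:])]
-- ===== Notes on version B (the rewrite author's own statement) =====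
-- stated objective: alternative
-- what changed: Replaces A's accumulator-threading nested loop (append-then-reset counter) by expanding the counts into a run-length index list, framing it with the boundary values 0 and len(order)-1, and returning the consecutive differences of that sequence.
import Mathlib
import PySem

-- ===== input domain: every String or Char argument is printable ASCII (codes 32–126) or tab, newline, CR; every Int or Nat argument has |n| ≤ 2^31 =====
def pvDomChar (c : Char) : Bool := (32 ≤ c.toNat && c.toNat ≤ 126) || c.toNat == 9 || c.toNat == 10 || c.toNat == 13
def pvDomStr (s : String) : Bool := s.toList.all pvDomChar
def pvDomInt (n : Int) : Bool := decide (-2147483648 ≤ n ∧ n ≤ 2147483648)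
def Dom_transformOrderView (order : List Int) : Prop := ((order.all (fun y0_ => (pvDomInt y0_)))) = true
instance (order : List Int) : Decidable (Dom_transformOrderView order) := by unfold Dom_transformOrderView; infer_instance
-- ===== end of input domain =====

-- B replaces A's accumulator-threading nested loop by expanding the counts into a
-- run-length index list and returning consecutive differences (alternative decomposition).


-- ===== PORT A =====
def transformOrderView (order : List Int) : List Int :=
  let s := order.foldl
    (fun (st : List Int × Int) oi =>
      let st2 := (PySem.List.pyRange 0 oi 1).foldl
        (fun (st : List Int × Int) _ => (st.1 ++ [st.2], 0)) st
      (st2.1, st2.2 + 1))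
    ([], 0)
  s.1 ++ [s.2 - 1]

-- ===== PORT B =====
def transformOrderView_alt (order : List Int) : List Int :=
  let expanded := (PySem.List.enumerate order).flatMap
    (fun ic => (PySem.List.pyRange 0 ic.2 1).map (fun _ => ic.1))
  let seq := [(0 : Int)] ++ expanded ++ [(order.length : Int) - 1]
  (seq.zip seq.tail).map (fun p => p.2 - p.1)

-- ===== PRECONDITION & SPEC =====
def Spec_transformOrderView (order : List Int) (out : List Int) : Prop := out = transformOrderView_alt order
instance (order : List Int) (out : List Int) : Decidable (Spec_transformOrderView order out) := by unfold Spec_transformOrderView; infer_instance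

-- ===== CLAIM (what is proved, stated in full; the proofs are below) =====
def Claim_equal_transformOrderView : Prop := ∀ (order : List Int), Dom_transformOrderView order → Spec_transformOrderView order (transformOrderView order)

-- ===== LEMMAS AND PROOFS =====

-- abstract form of A's fold
def runA (cs : List Int) (view : List Int) (accu : Int) : List Int × Int :=
  match cs with
  | [] => (view, accu)
  | c :: cs =>
      if 0 < c then runA cs (view ++ accu :: List.replicate (c - 1).toNat 0) 1
      else runA cs view (accu + 1)

-- consecutive differences of prev :: xs ++ [last]
def diffsFrom (prev : Int) (xs : List Int) (last : Int) : List Int :=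
  match xs with
  | [] => [last - prev]
  | x :: xs => (x - prev) :: diffsFrom x xs last

theorem innerA (l : List Int) (view : List Int) (accu : Int) :
    l.foldl (fun (st : List Int × Int) _ => (st.1 ++ [st.2], 0)) (view, accu)
      = (view ++ (if l = [] then [] else accu :: List.replicate (l.length - 1) 0),
         if l = [] then accu else 0) := by
  induction l generalizing view accu with
  | nil => simp
  | cons a l ih =>
      simp only [List.foldl_cons, ih]
      cases l <;> simp [List.replicate_succ]

theorem runA_eq_foldl (cs : List Int) (view : List Int) (accu : Int) :
    cs.foldl
      (fun (st : List Int × Int) oi =>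
        let st2 := (PySem.List.pyRange 0 oi 1).foldl
          (fun (st : List Int × Int) _ => (st.1 ++ [st.2], 0)) st
        (st2.1, st2.2 + 1)) (view, accu) = runA cs view accu := by
  induction cs generalizing view accu with
  | nil => rfl
  | cons c cs ih =>
      simp only [List.foldl_cons, innerA, runA]
      by_cases h : 0 < c
      · have hne : PySem.List.pyRange 0 c 1 ≠ [] := by
          have := PySem.List.pyRange_one_cons (a := 0) (b := c) h
          simp [this]
        rw [if_pos h]
        simp [hne, ih]
      · have he : PySem.List.pyRange 0 c 1 = [] :=
          PySem.List.pyRange_one_eq_nil (by omega)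
        rw [if_neg h]
        simp [he, ih]

theorem runA_view (cs : List Int) (view : List Int) (accu : Int) :
    runA cs view accu = (view ++ (runA cs [] accu).1, (runA cs [] accu).2) := by
  induction cs generalizing view accu with
  | nil => simp [runA]
  | cons c cs ih =>
      simp only [runA]
      by_cases h : 0 < c
      · rw [if_pos h, if_pos h, ih]
        rw [ih ([] ++ accu :: List.replicate (c-1).toNat 0) 1]
        simp
      · rw [if_neg h, if_neg h, ih]

-- B's expanded list starting from index p
def expandFrom (p : Int) (cs : List Int) : List Int :=
  match cs with
  | [] => []
  | c :: cs => List.replicate c.toNat p ++ expandFrom (p + 1) cs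

theorem diffsFrom_replicate (k : Nat) (prev p : Int) (xs : List Int) (last : Int) :
    diffsFrom prev (List.replicate (k + 1) p ++ xs) last
      = (p - prev) :: (List.replicate k 0 ++ diffsFrom p xs last) := by
  induction k generalizing prev with
  | zero => cases xs <;> simp [diffsFrom]
  | succ k ih =>
      rw [List.replicate_succ, List.cons_append, diffsFrom,
        show k + 1 = k + 1 from rfl, ih p]
      simp [List.replicate_succ]

theorem main_lemma (cs : List Int) (p prev : Int) :
    (runA cs [] (p - prev)).1 ++ [(runA cs [] (p - prev)).2 - 1]
      = diffsFrom prev (expandFrom p cs) (p + cs.length - 1) := by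
  induction cs generalizing p prev with
  | nil => simp [runA, expandFrom, diffsFrom]; ring
  | cons c cs ih =>
      simp only [runA, expandFrom]
      by_cases h : 0 < c
      · rw [if_pos h]
        obtain ⟨k, hk⟩ : ∃ k, c.toNat = k + 1 := ⟨c.toNat - 1, by omega⟩
        rw [hk, diffsFrom_replicate, runA_view]
        have h1 : (1 : Int) = (p + 1) - p := by ring
        have hlen : p + ((c :: cs).length : Int) - 1 = (p + 1) + (cs.length : Int) - 1 := by
          simp; ring
        rw [hlen, ← ih (p + 1) p, ← h1]
        have hk' : (c - 1).toNat = k := by omega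
        simp [hk']
      · rw [if_neg h]
        have : p - prev + 1 = (p + 1) - prev := by ring
        rw [this]
        have hlen : p + ((c :: cs).length : Int) - 1 = (p + 1) + (cs.length : Int) - 1 := by
          simp; ring
        have hrep : List.replicate c.toNat p = [] := by
          have : c.toNat = 0 := by omega
          simp [this]
        rw [hlen, hrep, List.nil_append, ih]

theorem map_const_pyRange (c i : Int) :
    (PySem.List.pyRange 0 c 1).map (fun _ => i) = List.replicate c.toNat i := by
  simp [PySem.List.pyRange_one, Function.comp_def, List.map_const']

theorem flatMap_enumerate_expand (cs : List Int) (s : Int) :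
    (PySem.List.enumerate cs s).flatMap
        (fun ic => (PySem.List.pyRange 0 ic.2 1).map (fun _ => ic.1))
      = expandFrom s cs := by
  induction cs generalizing s with
  | nil => simp [PySem.List.enumerate_nil, expandFrom]
  | cons c cs ih =>
      rw [PySem.List.enumerate_cons]
      simp only [List.flatMap_cons, map_const_pyRange, expandFrom]
      rw [← ih (s + 1)]
      simp only [map_const_pyRange]

theorem zip_diffs (xs : List Int) (prev last : Int) :
    (((prev :: (xs ++ [last])).zip (xs ++ [last])).map (fun p => p.2 - p.1))
      = diffsFrom prev xs last := by
  induction xs generalizing prev with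
  | nil => simp [diffsFrom]
  | cons x xs ih => simp only [List.cons_append, List.zip_cons_cons, List.map_cons,
      diffsFrom, ih]

theorem alt_eq_diffs (order : List Int) :
    transformOrderView_alt order
      = diffsFrom 0 (expandFrom 0 order) ((order.length : Int) - 1) := by
  unfold transformOrderView_alt
  rw [flatMap_enumerate_expand]
  simpa using zip_diffs (expandFrom 0 order) 0 ((order.length : Int) - 1)

-- ===== VERDICT (by name: the statement is the Claim_ definition above) =====
theorem transformOrderView_spec : Claim_equal_transformOrderView := by
  intro order _
  show transformOrderView order = transformOrderView_alt order
  unfold transformOrderView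
  rw [runA_eq_foldl, alt_eq_diffs]
  have := main_lemma order 0 0
  simpa using this
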